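-- pv_equiv track=rewrite | github.com/QI1002/exampool | Cracking_the_Coding_Interview/9-6.py | genRowFirstMatrix
-- ===== SOURCE A (Python) =====
-- def genRowFirstMatrix(m,n,offset):
--     matrix = []
--     for y in range(n):
--         matrix.append([])
--         for x in range(m):
--             matrix[y].append(offset)
--             offset += 1
--     return matrix
-- ===== SOURCE B (Python) =====
-- def genRowFirstMatrix(m, n, offset):
--     # Stage 1: materialize the whole flat run once (degenerate dims clamp to an empty run).
--     w = max(m, 0)
--     flat = list(range(offset, offset + w * max(n, 0)))
--     # Stage 2: cut it into rows of width w by slicing.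
--     return [flat[y * w:(y + 1) * w] for y in range(n)]
-- ===== Notes on version B (the rewrite author's own statement) =====
-- stated objective: alternative
-- what changed: Replaces the nested append loops threading a mutable running counter by two staged passes: materialize the flat run range(offset, offset + w*max(n,0)) once (w = max(m,0)), then cut it into rows by slicing flat[y*w:(y+1)*w].
import Mathlib
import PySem

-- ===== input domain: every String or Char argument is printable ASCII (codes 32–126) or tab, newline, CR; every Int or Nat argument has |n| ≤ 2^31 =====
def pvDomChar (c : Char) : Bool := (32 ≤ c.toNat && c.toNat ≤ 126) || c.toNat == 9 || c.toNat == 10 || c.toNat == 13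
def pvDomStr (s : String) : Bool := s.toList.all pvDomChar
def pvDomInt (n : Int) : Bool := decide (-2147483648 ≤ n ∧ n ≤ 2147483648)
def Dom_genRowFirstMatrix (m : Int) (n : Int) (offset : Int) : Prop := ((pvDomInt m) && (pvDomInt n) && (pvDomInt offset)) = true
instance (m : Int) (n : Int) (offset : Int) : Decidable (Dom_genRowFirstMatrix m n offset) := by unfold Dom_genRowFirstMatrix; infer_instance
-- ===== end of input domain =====

-- B builds the flat run of m*n consecutive integers once and then cuts it into rows by slicing (staged passes, no running counter; same cost).


-- ===== PORT A =====
-- A: outer loop appends a fresh row, inner loop appends the running 'offset' and increments it.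
def genRowFirstMatrix (m : Int) (n : Int) (offset : Int) : List (List Int) :=
  let res := (PySem.List.pyRange 0 n 1).foldl
    (fun (st : List (List Int) × Int) _y =>
      let inner := (PySem.List.pyRange 0 m 1).foldl
        (fun (p : List Int × Int) _x => (p.1 ++ [p.2], p.2 + 1)) ([], st.2)
      (st.1 ++ [inner.1], inner.2))
    ([], offset)
  res.1

-- ===== PORT B =====
-- B: w = max(m,0); flat = list(range(offset, offset + w*max(n,0))); rows are slices flat[y*w:(y+1)*w].
def genRowFirstMatrix_alt (m : Int) (n : Int) (offset : Int) : List (List Int) :=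
  let w := max m 0
  let flat := PySem.List.pyRange offset (offset + w * max n 0) 1
  (PySem.List.pyRange 0 n 1).map (fun y =>
    PySem.List.slice flat (some (y * w)) (some ((y + 1) * w)))

-- ===== PRECONDITION & SPEC =====
def Spec_genRowFirstMatrix (m : Int) (n : Int) (offset : Int) (out : List (List Int)) : Prop := out = genRowFirstMatrix_alt m n offset
instance (m : Int) (n : Int) (offset : Int) (out : List (List Int)) : Decidable (Spec_genRowFirstMatrix m n offset out) := by unfold Spec_genRowFirstMatrix; infer_instance

-- ===== CLAIM (what is proved, stated in full; the proofs are below) =====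
def Claim_equal_genRowFirstMatrix : Prop := ∀ (m : Int) (n : Int) (offset : Int), Dom_genRowFirstMatrix m n offset → Spec_genRowFirstMatrix m n offset (genRowFirstMatrix m n offset)

-- ===== LEMMAS AND PROOFS =====

-- Peeling one element off a block of consecutive integers.
theorem pv_seq_succ (o : Int) (k : Nat) :
    (List.range (k+1)).map (fun (j : Nat) => o + (j : Int))
      = o :: (List.range k).map (fun (j : Nat) => (o + 1) + (j : Int)) := by
  rw [List.range_succ_eq_map]
  simp only [List.map_cons, List.map_map, Nat.cast_zero, add_zero]
  exact congrArg _ (List.map_congr_left fun j _ => by simp [Function.comp]; ring)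

-- A's inner loop, run over any list of length k from accumulator (acc, o),
-- appends the k consecutive integers o, o+1, … and ends with offset o + k.
theorem pv_inner (L : List Int) : ∀ (acc : List Int) (o : Int),
    L.foldl (fun (p : List Int × Int) _x => (p.1 ++ [p.2], p.2 + 1)) (acc, o)
      = (acc ++ (List.range L.length).map (fun (j : Nat) => o + (j : Int)), o + L.length) := by
  induction L with
  | nil => intro acc o; simp
  | cons a L ih =>
    intro acc o
    simp only [List.foldl_cons, ih, List.length_cons, Prod.mk.injEq]
    rw [pv_seq_succ]
    refine ⟨by simp, by push_cast; ring⟩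

-- Peeling one row off the block matrix.
theorem pv_rows_succ (o M : Int) (mn k : Nat) :
    (List.range (k+1)).map (fun (i : Nat) =>
        (List.range mn).map (fun (j : Nat) => o + (i : Int) * M + (j : Int)))
      = ((List.range mn).map (fun (j : Nat) => o + (j : Int)))
        :: (List.range k).map (fun (i : Nat) =>
             (List.range mn).map (fun (j : Nat) => (o + M) + (i : Int) * M + (j : Int))) := by
  rw [List.range_succ_eq_map]
  simp only [List.map_cons, List.map_map, Nat.cast_zero]
  congr 1
  · exact List.map_congr_left fun j _ => by simp
  · exact List.map_congr_left fun i _ => List.map_congr_left fun j _ => by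
      simp; ring

-- A's outer loop over any list of length r builds r rows; row i holds the
-- m.toNat consecutive integers starting at o + i * m.toNat.
theorem pv_outer (m : Int) (L : List Int) : ∀ (mat : List (List Int)) (o : Int),
    L.foldl
      (fun (st : List (List Int) × Int) _y =>
        let inner := (PySem.List.pyRange 0 m 1).foldl
          (fun (p : List Int × Int) _x => (p.1 ++ [p.2], p.2 + 1)) ([], st.2)
        (st.1 ++ [inner.1], inner.2))
      (mat, o)
      = (mat ++ (List.range L.length).map (fun (i : Nat) =>
            (List.range m.toNat).map (fun (j : Nat) => o + (i : Int) * (m.toNat : Int) + (j : Int))),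
          o + L.length * (m.toNat : Int)) := by
  induction L with
  | nil => intro mat o; simp
  | cons a L ih =>
    intro mat o
    have hlen : (PySem.List.pyRange 0 m 1).length = m.toNat := by
      simp [PySem.List.length_pyRange_one]
    have hstep : (let inner := List.foldl (fun (p : List Int × Int) _x => (p.1 ++ [p.2], p.2 + 1)) ([], (mat, o).2) (PySem.List.pyRange 0 m 1); ((mat, o).1 ++ [inner.1], inner.2))
        = (mat ++ [(List.range m.toNat).map (fun (j : Nat) => o + (j : Int))],
            o + (m.toNat : Int)) := by
      simp only [pv_inner, hlen, List.nil_append]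
    rw [List.foldl_cons]
    rw [hstep, ih, List.length_cons, pv_rows_succ]
    exact Prod.ext (by simp) (by push_cast; ring)

theorem pv_pyRange_map {β : Type} (m : Int) (f : Int → β) :
    (PySem.List.pyRange 0 m 1).map f = (List.range m.toNat).map (fun (k : Nat) => f (k : Int)) := by
  rw [PySem.List.pyRange_one]
  simp [List.map_map, Function.comp_def]

-- B's row slice equals the block of m.toNat consecutive integers starting at offset + i*m.toNat.
theorem pv_row (m n offset : Int) (i : Nat) (hi : (i : Int) < n) :
    PySem.List.slice (PySem.List.pyRange offset (offset + max m 0 * max n 0) 1)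
        (some ((i : Int) * max m 0)) (some (((i : Int) + 1) * max m 0))
      = (List.range m.toNat).map (fun (j : Nat) => offset + (i : Int) * (m.toNat : Int) + (j : Int)) := by
  have hn : max n 0 = n := by omega
  rw [hn]
  by_cases hm : m ≤ 0
  · -- w = 0: flat is empty and each row is empty
    have hw : max m 0 = 0 := by omega
    have hflat : PySem.List.pyRange offset (offset + max m 0 * n) 1 = [] := by
      rw [hw]; exact PySem.List.pyRange_one_eq_nil (by omega)
    have hm0 : m.toNat = 0 := by omega
    rw [hflat, hw, hm0]
    have hlen := PySem.List.length_slice ([] : List Int) ((i : Int) * 0) (((i : Int) + 1) * 0)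
    have hle1 := PySem.List.clampIdx_le ([] : List Int).length (((i : Int) + 1) * 0)
    simp only [List.length_nil, List.range_zero, List.map_nil] at hlen hle1 ⊢
    exact List.eq_nil_of_length_eq_zero (by omega)
  · push Not at hm
    have hw : max m 0 = m := by omega
    rw [hw]
    have hi0 : (0:Int) ≤ (i : Int) * m := by positivity
    have hflat : PySem.List.pyRange offset (offset + m * n) 1
        = (List.range (m * n).toNat).map (fun (k : Nat) => offset + (k : Int)) := by
      rw [PySem.List.pyRange_one]
      have h : offset + m * n - offset = m * n := by ring
      rw [h]
    have ha : (i : Int) * m = (((i : Int) * m).toNat : Int) := (Int.toNat_of_nonneg hi0).symm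
    have hb : ((i : Int) + 1) * m = ((((i : Int) + 1) * m).toNat : Int) := by nlinarith [Int.toNat_of_nonneg (show (0:Int) ≤ ((i:Int)+1)*m by positivity)]
    rw [hflat, ha, hb, PySem.List.slice_natCast]
    set a := ((i : Int) * m).toNat with hadef
    set b := (((i : Int) + 1) * m).toNat with hbdef
    set N := (m * n).toNat with hNdef
    have hba : (b : Int) = (a : Int) + m := by rw [← ha, ← hb]; ring
    have hbN : b ≤ N := by
      have : ((i : Int) + 1) * m ≤ m * n := by nlinarith
      omega
    apply List.ext_getElem
    · simp; omega
    · intro j h1 h2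
      have hjm : j < m.toNat := by simpa using h2
      have haj : a + j < N := by omega
      simp only [List.getElem_take, List.getElem_drop, List.getElem_map, List.getElem_range]
      have : offset + ((a + j : Nat) : Int) = offset + (i : Int) * (m.toNat : Int) + (j : Int) := by
        push_cast
        have : ((a : Int)) = (i : Int) * m := ha.symm
        have hmm : ((m.toNat : Int)) = m := by omega
        rw [hmm]; omega
      simpa using this

-- ===== VERDICT (by name: the statement is the Claim_ definition above) =====
theorem genRowFirstMatrix_spec : Claim_equal_genRowFirstMatrix := by
  intro m n offset _
  unfold Spec_genRowFirstMatrix genRowFirstMatrix genRowFirstMatrix_alt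
  simp only [pv_outer, List.nil_append]
  have hlen : (PySem.List.pyRange 0 n 1).length = n.toNat := by
    simp [PySem.List.length_pyRange_one]
  rw [hlen]
  rw [pv_pyRange_map]
  refine (List.map_congr_left fun i hi => ?_).symm
  have hi' : (i : Int) < n := by
    have := List.mem_range.mp hi; omega
  exact pv_row m n offset i hi'
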